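-- pv_equiv track=rewrite | github.com/NBGtega/shoelace-cipher | shoe_lacing_algos.py | crisscross
-- ===== SOURCE A (Python) =====
-- y_ascii = ord('y')
--
-- Y_ascii = ord('Y')
--
-- z_ascii = ord('z')
--
-- Z_ascii = ord('Z')
--
-- def crisscross(text):
--
--     i = 0                                   #itereator
--     list_of_char = list(text)               #list of input text
--     output = []                             #output var
--
--     while i < len(text):                    #runs till all characters are converted
--         ascii_value = ord(list_of_char[i])  #ascii value of letter
--         if ascii_value in range(ord('A'), Y_ascii) or ascii_value in range(ord('a'), y_ascii):    #check if the char is within supported character limit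
--
--             if ascii_value % 2 == 0:            #check if it's even
--                 ascii_value += 1                #step of one char forward
--             else:
--                 ascii_value += 3                #step of 3 char forward
--
--         elif ascii_value in [y_ascii, Y_ascii, z_ascii, Z_ascii, ord(" "), ord("!")]:   #special cases, no pattern
--             if ascii_value == y_ascii:
--                 ascii_value = ord('b')
--             elif ascii_value ==  Y_ascii:
--                 ascii_value = ord('B')
--             elif ascii_value ==  z_ascii:
--                 ascii_value = ord('a')
--             elif ascii_value == Z_ascii:
--                 ascii_value = ord('A')
--             elif ascii_value == ord(' '):
--                 ascii_value = ord('!')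
--             else:
--                 ascii_value = ord(' ')
--
--         else:
--             raise ValueError(f'Error: "{chr(ascii_value)}" is not supported \nOnly letters are supported')
--
--         output.append(chr(ascii_value))     #appending after converting back to chr
--         i += 1
--
--     return ''.join(output)
-- ===== SOURCE B (Python) =====
-- def _build_table():
--     t = {}
--     for base in (ord('A'), ord('a')):
--         for code in range(base, base + 24):          # A..X and a..x
--             t[chr(code)] = chr(code + 1 if code % 2 == 0 else code + 3)
--     t['y'] = 'b'; t['Y'] = 'B'; t['z'] = 'a'; t['Z'] = 'A'
--     t[' '] = '!'; t['!'] = ' '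
--     return t
--
-- _TABLE = _build_table()
--
-- def crisscross(text):
--     out = []
--     for ch in text:
--         try:
--             out.append(_TABLE[ch])
--         except KeyError:
--             raise ValueError(f'Error: "{ch}" is not supported \nOnly letters are supported')
--     return ''.join(out)
-- ===== Notes on version B (the rewrite author's own statement) =====
-- stated objective: idiomatic
-- what changed: A's per-character branch chain (range checks, even/odd +1/+3 arithmetic, elif ladder of special cases) is replaced by a translation dict precomputed once over the supported code points; the function body becomes a single flat table-lookup pass appending to a list.
import Mathlib
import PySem

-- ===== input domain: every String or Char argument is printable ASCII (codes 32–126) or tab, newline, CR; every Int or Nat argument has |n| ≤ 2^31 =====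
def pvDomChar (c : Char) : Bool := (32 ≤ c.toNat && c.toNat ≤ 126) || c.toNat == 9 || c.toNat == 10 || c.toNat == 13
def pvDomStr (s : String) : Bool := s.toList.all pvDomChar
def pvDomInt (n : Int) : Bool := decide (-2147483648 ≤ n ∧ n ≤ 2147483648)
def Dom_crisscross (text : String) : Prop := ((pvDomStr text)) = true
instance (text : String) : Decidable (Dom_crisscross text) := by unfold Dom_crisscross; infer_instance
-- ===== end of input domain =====

-- B replaces A's per-character branch arithmetic by a translation table built once and a flat lookup pass (idiomatic).
-- A raises ValueError on characters outside letters, space and the exclamation mark; those inputs are excluded by Pre_crisscross.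

-- ===== PORT A =====
-- one character of A's while-loop body: the range checks, the even/odd arithmetic,
-- and the elif chain of special cases, in A's branch order.
def crisscrossStepA (c : Char) : Char :=
  let a := c.toNat
  if ('A'.toNat ≤ a ∧ a < 'Y'.toNat) ∨ ('a'.toNat ≤ a ∧ a < 'y'.toNat) then
    if a % 2 = 0 then Char.ofNat (a + 1) else Char.ofNat (a + 3)
  else if a = 'y'.toNat then 'b'
  else if a = 'Y'.toNat then 'B'
  else if a = 'z'.toNat then 'a'
  else if a = 'Z'.toNat then 'A'
  else if a = ' '.toNat then '!'
  else if a = '!'.toNat then ' '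
  else c   -- Python raises ValueError here; excluded by Pre_crisscross

-- the while loop: walk list_of_char appending the converted char to output, then ''.join
def crisscross (text : String) : String :=
  String.mk (text.toList.foldl (fun out c => out ++ [crisscrossStepA c]) [])

-- ===== PORT B =====
-- _build_table(): entries for A..X / a..x via the +1/+3 rule, then the six special mappings
def pvTable : PySem.Dict Char Char :=
  let t : PySem.Dict Char Char := PySem.Dict.empty
  let t := ([(65 : Int), 97]).foldl (fun t base =>
    (PySem.List.pyRange base (base + 24) 1).foldl (fun t code =>
      t.insert (Char.ofNat code.toNat)
        (Char.ofNat (if PySem.Int.mod code 2 = 0 then (code + 1).toNat else (code + 3).toNat))) t) t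
  let t := t.insert 'y' 'b'
  let t := t.insert 'Y' 'B'
  let t := t.insert 'z' 'a'
  let t := t.insert 'Z' 'A'
  let t := t.insert ' ' '!'
  t.insert '!' ' '

-- the loop: look each character up in the table and join (KeyError → ValueError,
-- excluded by Pre_crisscross; the port returns the char itself there)
def crisscross_alt (text : String) : String :=
  String.mk (text.toList.map (fun c => (pvTable.get? c).getD c))

-- ===== PRECONDITION & SPEC =====
-- Pre_ excludes exactly the inputs on which A raises ValueError: any character
-- other than an ASCII letter, a space or an exclamation mark.
def pvSupportedChar (c : Char) : Bool :=
  (65 ≤ c.toNat && c.toNat ≤ 90) || (97 ≤ c.toNat && c.toNat ≤ 122) || c.toNat == 32 || c.toNat == 33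
def Pre_crisscross (text : String) : Prop := text.toList.all pvSupportedChar = true
instance (text : String) : Decidable (Pre_crisscross text) := by unfold Pre_crisscross; infer_instance
def pvWitness_crisscross : String := "Hz!"
def Spec_crisscross (text : String) (out : String) : Prop := out = crisscross_alt text
instance (text : String) (out : String) : Decidable (Spec_crisscross text out) := by unfold Spec_crisscross; infer_instance

-- ===== CLAIM (what is proved, stated in full; the proofs are below) =====
def Claim_equal_crisscross : Prop := ∀ (text : String), Dom_crisscross text → Pre_crisscross text → Spec_crisscross text (crisscross text)

-- ===== LEMMAS AND PROOFS =====
-- the supported characters, listed explicitly (proof helper)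
def pvSupported : List Char := [' ','!','A','B','C','D','E','F','G','H','I','J','K','L','M','N','O','P','Q','R','S','T','U','V','W','X','Y','Z','a','b','c','d','e','f','g','h','i','j','k','l','m','n','o','p','q','r','s','t','u','v','w','x','y','z']

-- every character satisfying Pre_'s per-character test is in the explicit list
set_option maxRecDepth 8000 in
theorem sup_mem (c : Char) (h : pvSupportedChar c = true) : c ∈ pvSupported := by
  simp only [pvSupportedChar, Bool.or_eq_true, Bool.and_eq_true, decide_eq_true_eq, beq_iff_eq] at h
  obtain ⟨n, hv, hn⟩ : ∃ n, Char.ofNat n = c ∧ n = c.toNat := ⟨c.toNat, Char.ofNat_toNat c, rfl⟩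
  rw [← hn] at h
  subst hv
  clear hn
  rcases h with ((⟨h1,h2⟩|⟨h1,h2⟩)|h1)|h1
  · interval_cases n <;> decide
  · interval_cases n <;> decide
  · subst h1; decide
  · subst h1; decide

-- the fold building B's table produces exactly this literal dict
set_option maxRecDepth 4000 in
theorem table_eval : pvTable = PySem.Dict.mk [('A','D'),('B','C'),('C','F'),('D','E'),('E','H'),('F','G'),('G','J'),('H','I'),('I','L'),('J','K'),('K','N'),('L','M'),('M','P'),('N','O'),('O','R'),('P','Q'),('Q','T'),('R','S'),('S','V'),('T','U'),('U','X'),('V','W'),('W','Z'),('X','Y'),('a','d'),('b','c'),('c','f'),('d','e'),('e','h'),('f','g'),('g','j'),('h','i'),('i','l'),('j','k'),('k','n'),('l','m'),('m','p'),('n','o'),('o','r'),('p','q'),('q','t'),('r','s'),('s','v'),('t','u'),('u','x'),('v','w'),('w','z'),('x','y'),('y','b'),('Y','B'),('z','a'),('Z','A'),(' ','!'),('!',' ')] := by decide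

-- on every supported character A's branch chain and B's table lookup agree
set_option maxRecDepth 4000 in
theorem step_eq_lookup : ∀ c ∈ pvSupported, crisscrossStepA c = (pvTable.get? c).getD c := by
  simp only [table_eval]
  intro c hc
  fin_cases hc <;> decide

-- ===== VERDICT (by name: the statement is the Claim_ definition above) =====
theorem crisscross_spec : Claim_equal_crisscross := by
  intro text _ hpre
  unfold Spec_crisscross crisscross crisscross_alt
  rw [PySem.List.foldl_append_singleton_eq_map]
  refine congrArg String.mk (List.map_congr_left (fun c hc => ?_))
  exact step_eq_lookup c (sup_mem c (List.all_eq_true.mp hpre c hc))
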